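-- pv_equiv track=rewrite | github.com/ulturgashev/psql-chat-example | fill_db.py | max_available_dialogs
-- ===== SOURCE A (Python) =====
-- def max_available_dialogs(user_count):
--     k = 2
--     n = user_count
--
--     if 0 <= k <= n:
--         ntok = 1
--         ktok = 1
--         for t in range(1, min(k, n - k) + 1):
--             ntok *= n
--             ktok *= t
--             n -= 1
--         return ntok // ktok
--     else:
--         return 0
-- ===== SOURCE B (Python) =====
-- def max_available_dialogs(user_count):
--     if user_count >= 2:
--         return user_count * (user_count - 1) // 2
--     return 0
-- ===== Notes on version B (the rewrite author's own statement) =====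
-- stated objective: simpler
-- what changed: Replaces the hand-rolled multiplicative binomial loop with the guarded closed form n*(n-1)//2 for n>=2 and 0 otherwise.
import Mathlib
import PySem

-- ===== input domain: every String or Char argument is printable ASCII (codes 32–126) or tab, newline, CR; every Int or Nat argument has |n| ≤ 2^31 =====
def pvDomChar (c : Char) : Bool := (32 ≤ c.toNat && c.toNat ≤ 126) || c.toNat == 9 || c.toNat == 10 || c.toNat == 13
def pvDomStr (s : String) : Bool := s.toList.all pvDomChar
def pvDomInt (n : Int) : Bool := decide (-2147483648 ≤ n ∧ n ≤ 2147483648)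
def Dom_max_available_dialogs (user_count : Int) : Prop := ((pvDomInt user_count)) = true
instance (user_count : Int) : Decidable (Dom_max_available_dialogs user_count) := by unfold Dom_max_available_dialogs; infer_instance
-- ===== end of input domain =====

-- B: guarded closed form n*(n-1)//2 instead of A's multiplicative binomial loop (simpler).
-- ===== PORT A =====
def max_available_dialogs (user_count : Int) : Int :=
  let k : Int := 2
  let n : Int := user_count
  if 0 ≤ k ∧ k ≤ n then
    let st := (PySem.List.pyRange 1 (min k (n - k) + 1) 1).foldl
      (fun (st : Int × Int × Int) t =>
        let ntok := st.1 * st.2.2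
        let ktok := st.2.1 * t
        (ntok, ktok, st.2.2 - 1)) (1, 1, n)
    PySem.Int.floordiv st.1 st.2.1
  else 0

-- ===== PORT B =====
def max_available_dialogs_alt (user_count : Int) : Int :=
  if 2 ≤ user_count then PySem.Int.floordiv (user_count * (user_count - 1)) 2
  else 0

-- ===== PRECONDITION & SPEC =====
def Spec_max_available_dialogs (user_count : Int) (out : Int) : Prop := out = max_available_dialogs_alt user_count
instance (user_count : Int) (out : Int) : Decidable (Spec_max_available_dialogs user_count out) := by unfold Spec_max_available_dialogs; infer_instance

-- ===== CLAIM (what is proved, stated in full; the proofs are below) =====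
def Claim_equal_max_available_dialogs : Prop := ∀ (user_count : Int), Dom_max_available_dialogs user_count → Spec_max_available_dialogs user_count (max_available_dialogs user_count)

-- ===== LEMMAS AND PROOFS =====

theorem range_13 : PySem.List.pyRange 1 3 1 = [1, 2] := by decide

-- ===== VERDICT (by name: the statement is the Claim_ definition above) =====
theorem max_available_dialogs_spec : Claim_equal_max_available_dialogs := by
  intro u _
  unfold Spec_max_available_dialogs max_available_dialogs max_available_dialogs_alt
  by_cases h2 : 2 ≤ u
  · rw [if_pos (by exact ⟨by norm_num, h2⟩ : (0:Int) ≤ 2 ∧ (2:Int) ≤ u), if_pos h2]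
    by_cases hu2 : u = 2
    · subst hu2; decide
    · by_cases hu3 : u = 3
      · subst hu3; decide
      · have hmin : min (2 : Int) (u - 2) = 2 := by omega
        rw [hmin]
        norm_num [range_13, List.foldl]
  · rw [if_neg (by omega : ¬ ((0:Int) ≤ 2 ∧ (2:Int) ≤ u)), if_neg h2]
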